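-- pv_equiv track=rewrite | github.com/gonnotleny-ai/MathMentor | server.py | normalize_ai_text
-- ===== SOURCE A (Python) =====
-- import unicodedata
--
-- def normalize_ai_text(text):
--     """NFC normalization + fix character-by-character AI output (newlines between each letter)."""
--     if not isinstance(text, str):
--         return text
--     text = unicodedata.normalize("NFC", text)
--     # Detect runs of ≥4 consecutive lines with ≤2 non-space chars and join them
--     lines = text.split("\n")
--     result = []
--     i = 0
--     while i < len(lines):
--         stripped = lines[i].strip()
--         if 0 < len(stripped) <= 2:
--             run = [stripped]
--             j = i + 1
--             while j < len(lines) and 0 < len(lines[j].strip()) <= 2: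
--                 run.append(lines[j].strip())
--                 j += 1
--             if len(run) >= 4:
--                 result.append("".join(run))
--                 i = j
--                 continue
--         result.append(lines[i])
--         i += 1
--     return "\n".join(result)
-- ===== SOURCE B (Python) =====
-- import unicodedata
--
-- def normalize_ai_text(text):
--     """NFC normalization + fix character-by-character AI output (newlines between each letter)."""
--     if not isinstance(text, str):
--         return text
--     text = unicodedata.normalize("NFC", text)
--
--     def is_short(line):
--         return 0 < len(line.strip()) <= 2
--
--     # Phase 1: group the lines into maximal runs with the same is_short key.
--     groups = []
--     for line in text.split("\n"):
--         k = is_short(line)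
--         if groups and groups[-1][0] == k:
--             groups[-1][1].append(line)
--         else:
--             groups.append((k, [line]))
--
--     # Phase 2: a run of >=4 short lines is joined (stripped); every other group is kept verbatim.
--     result = []
--     for k, group in groups:
--         if k and len(group) >= 4:
--             result.append("".join(l.strip() for l in group))
--         else:
--             result.extend(group)
--     return "\n".join(result)
-- ===== Notes on version B (the rewrite author's own statement) =====
-- stated objective: idiomatic
-- what changed: A's single index-jumping scan (inner run-collecting while loop with a continue, re-scanning short runs shorter than 4 line by line) is replaced by a two-phase groupby decomposition: first group all lines into maximal runs of equal is_short key, then emit each group at once (joined-stripped if short and >=4, verbatim otherwise).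
import Mathlib
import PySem

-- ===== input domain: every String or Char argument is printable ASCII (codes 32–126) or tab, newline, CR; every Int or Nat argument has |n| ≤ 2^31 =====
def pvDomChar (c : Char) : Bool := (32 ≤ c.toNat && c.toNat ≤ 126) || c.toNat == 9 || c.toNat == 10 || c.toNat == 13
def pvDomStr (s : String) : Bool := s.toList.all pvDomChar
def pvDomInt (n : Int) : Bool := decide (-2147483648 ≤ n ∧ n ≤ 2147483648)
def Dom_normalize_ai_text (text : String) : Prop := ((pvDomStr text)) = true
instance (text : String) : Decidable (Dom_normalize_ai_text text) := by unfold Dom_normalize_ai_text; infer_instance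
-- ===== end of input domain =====

-- B replaces A's index-jumping scan (with its inner run-collecting while loop and `continue`)
-- by a two-phase groupby decomposition: group all lines into maximal runs of equal "shortness",
-- then emit each group at once (objective: simpler/idiomatic; same linear cost).
-- On the stated ASCII domain NFC normalization is the identity and `text` is always a str,
-- so both ports omit the `unicodedata.normalize` call and the isinstance guard (exact on Dom).

-- ===== PORT A =====
-- the inner `while j < len(lines) and 0 < len(lines[j].strip()) <= 2` loop of A:
-- returns (the stripped lines collected into `run`, the remaining lines from index j)
def pvInnerA : List (List Char) → List (List Char) × List (List Char)
  | [] => ([], [])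
  | x :: xs =>
    if 0 < (PySem.Chars.strip x).length ∧ (PySem.Chars.strip x).length ≤ 2 then
      let p := pvInnerA xs
      (PySem.Chars.strip x :: p.1, p.2)
    else ([], x :: xs)

-- termination fact for goA, cited by name in decreasing_by
theorem pvInnerA_snd_len (ls : List (List Char)) : (pvInnerA ls).2.length ≤ ls.length := by
  induction ls with
  | nil => simp [pvInnerA]
  | cons x xs ih =>
    simp only [pvInnerA]
    split
    · exact Nat.le_succ_of_le ih
    · simp

-- A's outer while loop over the line list
def pvGoA : List (List Char) → List (List Char)
  | [] => []
  | l :: ls =>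
    let s := PySem.Chars.strip l
    if 0 < s.length ∧ s.length ≤ 2 then
      let p := pvInnerA ls
      let run := s :: p.1
      if 4 ≤ run.length then
        PySem.Chars.join [] run :: pvGoA p.2
      else
        l :: pvGoA ls
    else
      l :: pvGoA ls
termination_by ls => ls.length
decreasing_by
  · exact Nat.lt_succ_of_le (pvInnerA_snd_len ls)
  · simp
  · simp

def normalize_ai_text (text : String) : String :=
  -- text.split("\n") / "\n".join(result), exact via PySem.Chars
  let lines := PySem.Chars.splitOn text.toList ['\n']
  String.ofList (PySem.Chars.join ['\n'] (pvGoA lines))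

-- ===== PORT B =====
def pvIsShort (l : List Char) : Bool :=
  decide (0 < (PySem.Chars.strip l).length ∧ (PySem.Chars.strip l).length ≤ 2)

-- B's phase 1 loop body: append `line` to the last group if its key matches, else open a new group
def pvAddLine (groups : List (Bool × List (List Char))) (line : List Char) :
    List (Bool × List (List Char)) :=
  let k := pvIsShort line
  match groups.getLast? with
  | some last =>
      if last.1 == k then groups.dropLast ++ [(k, last.2 ++ [line])]
      else groups ++ [(k, [line])]
  | none => groups ++ [(k, [line])]

-- B's phase 2 loop body: join a run of ≥4 short lines, keep every other group verbatim
def pvEmit (acc : List (List Char)) (kg : Bool × List (List Char)) : List (List Char) :=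
  if kg.1 && decide (4 ≤ kg.2.length) then
    acc ++ [PySem.Chars.join [] (kg.2.map PySem.Chars.strip)]
  else acc ++ kg.2

def normalize_ai_text_alt (text : String) : String :=
  let lines := PySem.Chars.splitOn text.toList ['\n']
  let groups := lines.foldl pvAddLine []
  let result := groups.foldl pvEmit []
  String.ofList (PySem.Chars.join ['\n'] result)

-- ===== PRECONDITION & SPEC =====
def Spec_normalize_ai_text (text : String) (out : String) : Prop := out = normalize_ai_text_alt text
instance (text : String) (out : String) : Decidable (Spec_normalize_ai_text text out) := by unfold Spec_normalize_ai_text; infer_instance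

-- ===== CLAIM (what is proved, stated in full; the proofs are below) =====
def Claim_equal_normalize_ai_text : Prop := ∀ (text : String), Dom_normalize_ai_text text → Spec_normalize_ai_text text (normalize_ai_text text)

-- ===== LEMMAS AND PROOFS =====

-- span-style characterisation of B's phase-1 grouping
def pvChunks : List (List Char) → List (Bool × List (List Char))
  | [] => []
  | l :: ls =>
    (pvIsShort l, l :: ls.takeWhile (fun x => pvIsShort x == pvIsShort l)) ::
      pvChunks (ls.dropWhile (fun x => pvIsShort x == pvIsShort l))
termination_by ls => ls.length
decreasing_by
  exact Nat.lt_succ_of_le (List.length_dropWhile_le _ _)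

theorem pvChunks_nil : pvChunks [] = [] := by rw [pvChunks]

theorem pvChunks_cons (l : List Char) (ls : List (List Char)) :
    pvChunks (l :: ls) =
      (pvIsShort l, l :: ls.takeWhile (fun x => pvIsShort x == pvIsShort l)) ::
        pvChunks (ls.dropWhile (fun x => pvIsShort x == pvIsShort l)) := by
  rw [pvChunks]

theorem pvFoldl_addLine (ls : List (List Char)) :
    ∀ (gs : List (Bool × List (List Char))) (k : Bool) (g : List (List Char)),
    ls.foldl pvAddLine (gs ++ [(k, g)]) =
      gs ++ (k, g ++ ls.takeWhile (fun x => pvIsShort x == k)) ::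
        pvChunks (ls.dropWhile (fun x => pvIsShort x == k)) := by
  induction ls with
  | nil => simp [pvChunks]
  | cons l ls ih =>
    intro gs k g
    by_cases hk : pvIsShort l = k
    · subst hk
      have h1 : pvAddLine (gs ++ [(pvIsShort l, g)]) l = gs ++ [(pvIsShort l, g ++ [l])] := by
        simp [pvAddLine]
      rw [List.foldl_cons, h1, ih gs (pvIsShort l) (g ++ [l])]
      simp
    · have hne : ¬ k = pvIsShort l := fun h => hk h.symm
      have h1 : pvAddLine (gs ++ [(k, g)]) l = (gs ++ [(k, g)]) ++ [(pvIsShort l, [l])] := by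
        simp [pvAddLine, hne]
      rw [List.foldl_cons, h1, ih (gs ++ [(k, g)]) (pvIsShort l) [l]]
      simp [hk, pvChunks_cons]

theorem pvGroups_eq_chunks (ls : List (List Char)) :
    ls.foldl pvAddLine [] = pvChunks ls := by
  cases ls with
  | nil => simp [pvChunks]
  | cons l ls =>
    have h1 : pvAddLine [] l = [] ++ [(pvIsShort l, [l])] := by simp [pvAddLine]
    simp only [List.foldl_cons, h1, pvFoldl_addLine, pvChunks_cons]
    simp

theorem pvFoldl_emit (gs : List (Bool × List (List Char))) :
    ∀ acc, gs.foldl pvEmit acc = acc ++ gs.flatMap (fun kg => pvEmit [] kg) := by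
  induction gs with
  | nil => simp
  | cons kg gs ih =>
    intro acc
    simp only [List.foldl_cons, List.flatMap_cons, ih]
    unfold pvEmit
    split <;> simp

theorem pvInnerA_eq (ls : List (List Char)) :
    pvInnerA ls = ((ls.takeWhile pvIsShort).map PySem.Chars.strip, ls.dropWhile pvIsShort) := by
  induction ls with
  | nil => simp [pvInnerA]
  | cons x xs ih =>
    by_cases h : 0 < (PySem.Chars.strip x).length ∧ (PySem.Chars.strip x).length ≤ 2
    · have hs : pvIsShort x = true := by simp [pvIsShort, h]
      simp [pvInnerA, h, ih, hs]
    · have hs : pvIsShort x = false := by simp only [pvIsShort]; simpa using h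
      simp [pvInnerA, h, hs]

theorem pvGoA_nil : pvGoA [] = [] := by rw [pvGoA]

theorem pvGoA_cons (l : List Char) (ls : List (List Char)) :
    pvGoA (l :: ls) =
      if 0 < (PySem.Chars.strip l).length ∧ (PySem.Chars.strip l).length ≤ 2 then
        if 4 ≤ (PySem.Chars.strip l :: (pvInnerA ls).1).length then
          PySem.Chars.join [] (PySem.Chars.strip l :: (pvInnerA ls).1) :: pvGoA (pvInnerA ls).2
        else l :: pvGoA ls
      else l :: pvGoA ls := by
  rw [pvGoA]

theorem pvGoA_nonshort (ls : List (List Char)) :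
    pvGoA ls = ls.takeWhile (fun x => !pvIsShort x) ++
      pvGoA (ls.dropWhile (fun x => !pvIsShort x)) := by
  induction ls with
  | nil => simp [pvGoA_nil]
  | cons l ls ih =>
    by_cases h : 0 < (PySem.Chars.strip l).length ∧ (PySem.Chars.strip l).length ≤ 2
    · have hs : pvIsShort l = true := by simp [pvIsShort, h]
      simp [hs]
    · have hs : pvIsShort l = false := by simp only [pvIsShort]; simpa using h
      simp [pvGoA_cons, h, hs, ih]

theorem pvGoA_shortrun (ls : List (List Char)) (h : (ls.takeWhile pvIsShort).length ≤ 2) :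
    pvGoA ls = ls.takeWhile pvIsShort ++ pvGoA (ls.dropWhile pvIsShort) := by
  induction ls with
  | nil => simp
  | cons l ls ih =>
    by_cases hp : 0 < (PySem.Chars.strip l).length ∧ (PySem.Chars.strip l).length ≤ 2
    · have hs : pvIsShort l = true := by simp [pvIsShort, hp]
      have htw : (l :: ls).takeWhile pvIsShort = l :: ls.takeWhile pvIsShort := by
        simp [hs]
      rw [htw] at h ⊢
      have hlen : (ls.takeWhile pvIsShort).length ≤ 1 := by
        simpa using h
      have hrun : ¬ 4 ≤ (PySem.Chars.strip l :: (pvInnerA ls).1).length := by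
        rw [pvInnerA_eq]
        simp only [List.length_cons, List.length_map]
        omega
      rw [pvGoA_cons, if_pos hp, if_neg hrun]
      have hdw : (l :: ls).dropWhile pvIsShort = ls.dropWhile pvIsShort := by
        simp [hs]
      rw [hdw, ih (by omega)]
      simp
    · have hs : pvIsShort l = false := by simp only [pvIsShort]; simpa using hp
      simp [hs]

theorem pvGoA_eq (n : Nat) : ∀ ls : List (List Char), ls.length ≤ n →
    pvGoA ls = (pvChunks ls).flatMap (fun kg => pvEmit [] kg) := by
  induction n with
  | zero =>
    intro ls hls
    have : ls = [] := List.length_eq_zero_iff.mp (Nat.le_zero.mp hls)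
    subst this
    simp [pvGoA_nil, pvChunks_nil]
  | succ n ih =>
    intro ls hls
    cases ls with
    | nil => simp [pvGoA_nil, pvChunks_nil]
    | cons l ls =>
      have hlen : ls.length ≤ n := by simpa using hls
      by_cases hp : 0 < (PySem.Chars.strip l).length ∧ (PySem.Chars.strip l).length ≤ 2
      · have hs : pvIsShort l = true := by simp [pvIsShort, hp]
        by_cases h4 : 4 ≤ (PySem.Chars.strip l :: (pvInnerA ls).1).length
        · rw [pvGoA_cons, if_pos hp, if_pos h4, pvChunks_cons]
          have hglen : 3 ≤ (ls.takeWhile pvIsShort).length := by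
            have := h4
            rw [pvInnerA_eq] at this
            simp only [List.length_cons, List.length_map] at this
            omega
          have hrest : pvGoA (pvInnerA ls).2 =
              (pvChunks (ls.dropWhile pvIsShort)).flatMap (fun kg => pvEmit [] kg) := by
            rw [pvInnerA_eq]
            exact ih _ (le_trans (List.length_dropWhile_le _ _) hlen)
          rw [hrest, pvInnerA_eq]
          simp [pvEmit, hs, hglen]
        · have htwlen : (ls.takeWhile pvIsShort).length ≤ 2 := by
            rw [pvInnerA_eq] at h4
            simp only [List.length_cons, List.length_map] at h4
            omega
          rw [pvGoA_cons, if_pos hp, if_neg h4,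
              pvGoA_shortrun ls htwlen, pvChunks_cons,
              ih (ls.dropWhile pvIsShort) (le_trans (List.length_dropWhile_le _ _) hlen)]
          have hglen : ¬ 3 ≤ (ls.takeWhile pvIsShort).length := by omega
          simp [pvEmit, hs, hglen]
      · have hs : pvIsShort l = false := by simp only [pvIsShort]; simpa using hp
        rw [pvGoA_cons, if_neg hp, pvGoA_nonshort ls, pvChunks_cons,
            ih (ls.dropWhile (fun x => !pvIsShort x))
              (le_trans (List.length_dropWhile_le _ _) hlen)]
        simp [pvEmit, hs]

-- ===== VERDICT (by name: the statement is the Claim_ definition above) =====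
theorem normalize_ai_text_spec : Claim_equal_normalize_ai_text := by
  intro text _
  unfold Spec_normalize_ai_text normalize_ai_text normalize_ai_text_alt
  simp only [pvGroups_eq_chunks, pvFoldl_emit, List.nil_append]
  rw [pvGoA_eq (PySem.Chars.splitOn text.toList ['\n']).length _ (Nat.le_refl _)]
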